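-- pv_equiv track=rewrite | github.com/Zenfeuer/courses | Misc/cellCompetition.py | cellCompetition
-- ===== SOURCE A (Python) =====
-- def cellCompetition(states, days):
--
--     n = len(states)
--
--     for i in range(days):
--         for j in range(n):
--
--             neighborL = 0
--             neighborR = 0
--
--             if j > 0:
--                 neighborL = prevState
--
--             if j < n - 1:
--                 neighborR = states[j + 1]
--
--             prevState = states[j]
--
--             if neighborL == neighborR:
--                 states[j] = 0
--             else:
--                 states[j] = 1
--
--     return states
-- ===== SOURCE B (Python) =====
-- def cellCompetition(states, days):
--     n = len(states)
--     if days <= 0 or n == 0: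
--         return states
--
--     # day 1 from the arbitrary initial values
--     first = [0 if (states[j - 1] if j > 0 else 0) == (states[j + 1] if j < n - 1 else 0) else 1
--              for j in range(n)]
--
--     # pack the (now binary) board into one integer, bit j = cell j
--     x = 0
--     for v in reversed(first):
--         x = x * 2 + v
--     mask = (1 << n) - 1
--
--     def step(y):
--         return ((y << 1) ^ (y >> 1)) & mask
--
--     # walk the remaining days with cycle detection on the hashed bitboard
--     seen = {}
--     d = 1
--     while d < days:
--         if x in seen:
--             rem = (days - d) % (d - seen[x])
--             for _ in range(rem):
--                 x = step(x)
--             break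
--         seen[x] = d
--         x = step(x)
--         d += 1
--
--     states[:] = [(x >> j) & 1 for j in range(n)]  # same in-place mutation as A
--     return states
-- ===== Notes on version B (the rewrite author's own statement) =====
-- stated objective: faster
-- what changed: B replaces A's in-place day-by-day cell loop with a bit-packed board stepped by ((x<<1)^(x>>1))&mask in one big-integer operation per day, plus cycle detection via a hash map of seen boards that skips the remaining days modulo the detected period.
import Mathlib
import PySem

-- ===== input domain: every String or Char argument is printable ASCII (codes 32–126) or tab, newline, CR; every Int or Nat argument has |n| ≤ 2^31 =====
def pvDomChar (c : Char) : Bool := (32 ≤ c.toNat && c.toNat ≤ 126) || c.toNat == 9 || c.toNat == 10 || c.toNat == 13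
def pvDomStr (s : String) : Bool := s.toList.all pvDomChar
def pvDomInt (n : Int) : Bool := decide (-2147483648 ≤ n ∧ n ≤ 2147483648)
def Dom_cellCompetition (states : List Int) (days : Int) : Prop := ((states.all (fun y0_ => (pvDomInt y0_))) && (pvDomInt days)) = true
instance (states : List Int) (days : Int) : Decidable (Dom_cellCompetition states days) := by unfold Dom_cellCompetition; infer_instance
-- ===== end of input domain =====

-- B packs the (binary after day 1) board into one integer, steps it with bit operations,
-- and detects cycles via a hash map of seen boards, skipping the remaining days modulo the
-- detected period (objective: faster).
-- A mutates `states` in place; the equivalence proved here is about the RETURN value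
-- (B performs the same in-place mutation via `states[:] = ...`).

-- ===== PORT A =====
-- inner 'for j in range(n)' loop of A; state = (states, prevState).
-- prevState is unbound in Python before the first write, but it is only read when j > 0,
-- by which point it has been written; the initial 0 here is a never-read placeholder.
def innerA (n : Int) (sts : List Int) : List Int × Int :=
  (PySem.List.pyRange 0 n 1).foldl (fun (p : List Int × Int) j =>
    let neighborL : Int := if j > 0 then p.2 else 0
    let neighborR : Int := if j < n - 1 then PySem.List.pyGetD p.1 (j + 1) 0 else 0
    let prevState : Int := PySem.List.pyGetD p.1 j 0
    ((PySem.List.pySetD p.1 j (if neighborL == neighborR then (0 : Int) else 1)), prevState))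
    (sts, 0)

def cellCompetition (states : List Int) (days : Int) : List Int :=
  let n : Int := PySem.List.len states
  (PySem.List.pyRange 0 days 1).foldl (fun sts _ => (innerA n sts).1) states

-- ===== PORT B =====
-- B's `first` comprehension: day 1 computed from the arbitrary initial values
def stepB (n : Int) (s : List Int) : List Int :=
  (PySem.List.pyRange 0 n 1).map (fun j =>
    if (if j > 0 then PySem.List.pyGetD s (j - 1) 0 else 0)
       == (if j < n - 1 then PySem.List.pyGetD s (j + 1) 0 else 0)
    then (0 : Int) else 1)

-- 'x = 0; for v in reversed(first): x = x * 2 + v' — Python's x stays a nonnegative int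
-- (every v is 0 or 1), so it is ported as Nat; exact on this domain.
def encB (l : List Int) : Nat :=
  l.reverse.foldl (fun x v => x * 2 + v.toNat) 0

-- 'step = lambda y: ((y << 1) ^ (y >> 1)) & mask' on the nonnegative bitboard
def stepN (mask : Nat) (y : Nat) : Nat :=
  ((y <<< 1) ^^^ (y >>> 1)) &&& mask

-- '[(x >> j) & 1 for j in range(n)]'; j ranges over 0..n-1 so j.toNat is exact
def decB (n : Int) (x : Nat) : List Int :=
  (PySem.List.pyRange 0 n 1).map (fun j => (((x >>> j.toNat) &&& 1 : Nat) : Int))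

-- B's 'while d < days' loop; fuel = days.toNat bounds the iteration count (d increments
-- towards days each pass), it does not change the computation.
def loopB (days : Int) (mask : Nat) (fuel : Nat) (seen : PySem.Dict Nat Int)
    (x : Nat) (d : Int) : Nat :=
  match fuel with
  | 0 => x
  | Nat.succ f =>
    if d < days then
      match seen.get? x with
      | some e =>
        -- cycle: skip ahead, then step the remaining (days - d) % period days
        (List.range (PySem.Int.mod (days - d) (d - e)).toNat).foldl
          (fun y _ => stepN mask y) x
      | none => loopB days mask f (seen.insert x d) (stepN mask x) (d + 1)
    else x

def cellCompetition_alt (states : List Int) (days : Int) : List Int :=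
  let n : Int := PySem.List.len states
  if days ≤ 0 ∨ n = 0 then states
  else
    let first := stepB n states
    let x := encB first
    let mask := (1 <<< n.toNat) - 1  -- '(1 << n) - 1', n ≥ 0
    decB n (loopB days mask days.toNat PySem.Dict.empty x 1)

-- ===== PRECONDITION & SPEC =====
def Spec_cellCompetition (states : List Int) (days : Int) (out : List Int) : Prop := out = cellCompetition_alt states days
instance (states : List Int) (days : Int) (out : List Int) : Decidable (Spec_cellCompetition states days out) := by unfold Spec_cellCompetition; infer_instance

-- ===== CLAIM (what is proved, stated in full; the proofs are below) =====
def Claim_equal_cellCompetition : Prop := ∀ (states : List Int) (days : Int), Dom_cellCompetition states days → Spec_cellCompetition states days (cellCompetition states days)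

-- ===== LEMMAS AND PROOFS =====

-- the value B's comprehension gives cell j (and, as we prove, the value A's inner loop leaves there)
def newV (n : Int) (s : List Int) (j : Int) : Int :=
  if (if j > 0 then PySem.List.pyGetD s (j - 1) 0 else 0)
     == (if j < n - 1 then PySem.List.pyGetD s (j + 1) 0 else 0)
  then (0 : Int) else 1

lemma stepB_eq_map (n : Int) (s : List Int) :
    stepB n s = (PySem.List.pyRange 0 n 1).map (newV n s) := rfl

lemma length_stepB (n : Int) (s : List Int) :
    (stepB n s).length = n.toNat := by
  simp [stepB, PySem.List.length_pyRange_one]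

lemma getD_prefix_drop (old : List Int) (V : Nat → Int) (k m : Nat)
    (hm : k ≤ m) :
    ((List.range k).map (fun i => V i) ++ old.drop k).getD m 0 = old.getD m 0 := by
  have hlen : ((List.range k).map fun i => V i).length = k := by simp
  rw [List.getD_eq_getElem?_getD, List.getD_eq_getElem?_getD,
      List.getElem?_append_right (by omega), hlen, List.getElem?_drop]
  have : k + (m - k) = m := by omega
  rw [this]

lemma set_pref {α : Type} (pre rest : List α) (x v : α) :
    (pre ++ x :: rest).set pre.length v = pre ++ v :: rest := by
  induction pre with
  | nil => rfl
  | cons a t ih => simp [ih]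

lemma innerA_aux (old : List Int) (n : Int) (hn : n = (old.length : Int)) :
    ∀ (m k : Nat), old.length = k + m →
    (PySem.List.pyRange (k : Int) n 1).foldl (fun (p : List Int × Int) j =>
        let neighborL : Int := if j > 0 then p.2 else 0
        let neighborR : Int := if j < n - 1 then PySem.List.pyGetD p.1 (j + 1) 0 else 0
        let prevState : Int := PySem.List.pyGetD p.1 j 0
        ((PySem.List.pySetD p.1 j (if neighborL == neighborR then (0 : Int) else 1)), prevState))
      ((List.range k).map (fun i : Nat => newV n old (i : Int)) ++ old.drop k,
        if k = 0 then 0 else PySem.List.pyGetD old ((k : Int) - 1) 0)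
    = ((List.range old.length).map (fun i : Nat => newV n old (i : Int)),
        if old.length = 0 then 0 else PySem.List.pyGetD old ((old.length : Int) - 1) 0) := by
  intro m
  induction m with
  | zero =>
    intro k hk
    have hk' : k = old.length := by omega
    subst hk'
    rw [PySem.List.pyRange_one_eq_nil (by omega)]
    simp [List.drop_length]
  | succ m ih =>
    intro k hk
    have hklt : k < old.length := by omega
    rw [PySem.List.pyRange_one_cons (by omega), List.foldl_cons]
    have hlen : ((List.range k).map (fun i : Nat => newV n old (i : Int))).length = k := by simp
    have e2 : PySem.List.pyGetD ((List.range k).map (fun i : Nat => newV n old (i : Int)) ++ old.drop k) (k : Int) 0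
        = old.getD k 0 := by
      rw [PySem.List.pyGetD_natCast]
      exact getD_prefix_drop old _ k k le_rfl
    have e3 : PySem.List.pyGetD ((List.range k).map (fun i : Nat => newV n old (i : Int)) ++ old.drop k) ((k : Int) + 1) 0
        = PySem.List.pyGetD old ((k : Int) + 1) 0 := by
      have hc : ((k : Int) + 1) = ((k + 1 : Nat) : Int) := by push_cast; ring
      rw [hc, PySem.List.pyGetD_natCast, PySem.List.pyGetD_natCast]
      exact getD_prefix_drop old _ k (k + 1) (by omega)
    have e1 : (if (k : Int) > 0 then (if k = 0 then (0 : Int) else PySem.List.pyGetD old ((k : Int) - 1) 0) else 0) = (if (k : Int) > 0 then PySem.List.pyGetD old ((k : Int) - 1) 0 else 0) := by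
      by_cases h0 : k = 0
      · subst h0; norm_num
      · have : (k : Int) > 0 := by omega
        rw [if_pos this, if_pos this, if_neg h0]
    have eset : PySem.List.pySetD ((List.range k).map (fun i : Nat => newV n old (i : Int)) ++ old.drop k) (k : Int) (newV n old (k : Int))
        = (List.range (k + 1)).map (fun i : Nat => newV n old (i : Int)) ++ old.drop (k + 1) := by
      have hset := set_pref ((List.range k).map (fun i : Nat => newV n old (i : Int)))
        (old.drop (k + 1)) (old[k]'hklt) (newV n old (k : Int))
      rw [hlen] at hset
      rw [PySem.List.pySetD_natCast, List.drop_eq_getElem_cons hklt, hset,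
          List.range_succ, List.map_append, List.map_singleton, List.append_assoc]
      rfl
    simp only []
    rw [e1, e3, e2]
    have hbody : (if (if (k : Int) > 0 then PySem.List.pyGetD old ((k : Int) - 1) 0 else 0) == (if (k : Int) < n - 1 then PySem.List.pyGetD old ((k : Int) + 1) 0 else 0) then (0 : Int) else 1) = newV n old (k : Int) := rfl
    rw [hbody, eset]
    have hprev : old.getD k 0 = if k + 1 = 0 then (0 : Int) else PySem.List.pyGetD old (((k + 1 : Nat) : Int) - 1) 0 := by
      rw [if_neg (Nat.succ_ne_zero k)]
      have hc : ((k + 1 : Nat) : Int) - 1 = ((k : Nat) : Int) := by push_cast; ring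
      rw [hc, PySem.List.pyGetD_natCast]
    rw [hprev]
    have := ih (k + 1) (by omega)
    have hc : ((k + 1 : Nat) : Int) = (k : Int) + 1 := by push_cast; ring
    rw [hc] at this
    exact this

lemma innerA_eq_stepB (n : Int) (s : List Int) (hn : n = (s.length : Int)) :
    (innerA n s).1 = stepB n s := by
  have this := innerA_aux s n hn s.length 0 (by omega)
  simp only [List.range_zero, List.map_nil, List.nil_append, List.drop_zero, Nat.cast_zero,
    reduceIte] at this
  have h1 : (innerA n s).1 = (List.range s.length).map (fun i : Nat => newV n s (i : Int)) := by
    unfold innerA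
    rw [this]
  rw [h1, stepB_eq_map, PySem.List.pyRange_one, List.map_map]
  have hlen : (n - 0).toNat = s.length := by omega
  rw [hlen]
  apply List.map_congr_left
  intro i _
  simp

lemma foldl_range_iterate {α : Type} (g : α → α) (m : Nat) (x : α) :
    (List.range m).foldl (fun c _ => g c) x = g^[m] x := by
  induction m generalizing x with
  | zero => rfl
  | succ k ih => rw [List.range_succ, List.foldl_append, ih, Function.iterate_succ_apply']; rfl

lemma periodic_iterate {α : Type} (g : α → α) (x : α) (E P : Nat)
    (h : g^[E + P] x = g^[E] x) :
    ∀ (q m : Nat), E ≤ m → g^[m + q * P] x = g^[m] x := by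
  have one : ∀ m, E ≤ m → g^[m + P] x = g^[m] x := by
    intro m hm
    obtain ⟨t, rfl⟩ := Nat.exists_eq_add_of_le hm
    calc g^[E + t + P] x = g^[t] (g^[E + P] x) := by
          rw [← Function.iterate_add_apply]; ring_nf
        _ = g^[t] (g^[E] x) := by rw [h]
        _ = g^[E + t] x := by rw [← Function.iterate_add_apply]; ring_nf
  intro q
  induction q with
  | zero => intro m hm; simp
  | succ r ih =>
    intro m hm
    have : m + (r + 1) * P = (m + P) + r * P := by ring
    rw [this, ih (m + P) (by omega), one m hm]

-- raw bit read: (y >> k) & 1 as a testBit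
lemma bit_eq (y k : Nat) : (y >>> k) &&& 1 = if y.testBit k then 1 else 0 := by
  rcases Nat.mod_two_eq_zero_or_one (y / 2 ^ k) with h | h <;>
    simp [Nat.and_one_is_mod, Nat.shiftRight_eq_div_pow, Nat.testBit_eq_decide_div_mod_eq, h]

lemma length_decB (n : Int) (x : Nat) : (decB n x).length = n.toNat := by
  simp [decB, PySem.List.length_pyRange_one]

lemma decB_getElem (n : Int) (x : Nat) (k : Nat) (hk : k < (decB n x).length) :
    (decB n x)[k] = (((x >>> k) &&& 1 : Nat) : Int) := by
  have hk' : k < n.toNat := by simpa [length_decB] using hk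
  simp [decB, PySem.List.getElem_pyRange_one]

-- every cell B (and A) writes is 0 or 1
lemma binary_stepB (n : Int) (s : List Int) : ∀ v ∈ stepB n s, v = 0 ∨ v = 1 := by
  intro v hv
  simp only [stepB, List.mem_map] at hv
  obtain ⟨j, _, hj⟩ := hv
  rw [← hj]
  exact ite_eq_or_eq _ _ _

lemma encB_eq_foldr (l : List Int) :
    encB l = l.foldr (fun v x => x * 2 + v.toNat) 0 := by
  simp [encB, List.foldl_reverse]

lemma encB_lt (l : List Int) (hb : ∀ v ∈ l, v = 0 ∨ v = 1) :
    encB l < 2 ^ l.length := by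
  rw [encB_eq_foldr]
  induction l with
  | nil => simp
  | cons v t ih =>
    have hv : v.toNat ≤ 1 := by
      rcases hb v (List.mem_cons_self) with h | h <;> simp [h]
    have ht := ih (fun w hw => hb w (List.mem_cons_of_mem _ hw))
    simp only [List.foldr_cons, List.length_cons, pow_succ]
    omega

lemma encB_bit (l : List Int) (hb : ∀ v ∈ l, v = 0 ∨ v = 1) :
    ∀ (k : Nat), k < l.length → ∀ (hk : k < l.length),
      (encB l >>> k) &&& 1 = (l[k]'hk).toNat := by
  rw [encB_eq_foldr]
  induction l with
  | nil => intro k hk; simp at hk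
  | cons v t ih =>
    intro k _ hk
    cases k with
    | zero =>
      have hv : v.toNat ≤ 1 := by
        rcases hb v (List.mem_cons_self) with h | h <;> simp [h]
      simp only [List.foldr_cons, List.getElem_cons_zero]
      rw [Nat.shiftRight_zero, Nat.and_one_is_mod]
      omega
    | succ m =>
      have hm : m < t.length := by simpa using hk
      have hdiv : (t.foldr (fun v x => x * 2 + v.toNat) 0 * 2 + v.toNat) / 2
          = t.foldr (fun v x => x * 2 + v.toNat) 0 := by
        have hv : v.toNat ≤ 1 := by
          rcases hb v (List.mem_cons_self) with h | h <;> simp [h]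
        omega
      simp only [List.foldr_cons, List.getElem_cons_succ]
      rw [Nat.shiftRight_eq_div_pow, pow_succ, Nat.mul_comm (2 ^ m) 2,
          ← Nat.div_div_eq_div_mul, hdiv, ← Nat.shiftRight_eq_div_pow]
      exact ih (fun w hw => hb w (List.mem_cons_of_mem _ hw)) m hm hm

lemma dec_enc (l : List Int) (hb : ∀ v ∈ l, v = 0 ∨ v = 1) :
    decB (l.length : Int) (encB l) = l := by
  apply List.ext_getElem
  · simp [length_decB]
  · intro k h1 h2
    rw [decB_getElem _ _ _ h1, encB_bit l hb k h2 h2]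
    rcases hb _ (List.getElem_mem h2) with h | h <;> simp [h]

lemma stepN_lt (N : Nat) (y : Nat) : stepN (2 ^ N - 1) y < 2 ^ N := by
  have h1 : stepN (2 ^ N - 1) y ≤ 2 ^ N - 1 := Nat.and_le_right
  have h2 : 0 < 2 ^ N := Nat.two_pow_pos N
  omega

-- reading one decoded cell is reading one bit
lemma decB_pyGetD (N : Nat) (x : Nat) (m : Nat) (hm : m < N) :
    PySem.List.pyGetD (decB (N : Int) x) (m : Int) 0
      = if x.testBit m then (1 : Int) else 0 := by
  have hlen : (decB (N : Int) x).length = N := by simp [length_decB]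
  rw [PySem.List.pyGetD_natCast, List.getD_eq_getElem _ _ (by omega),
      decB_getElem _ _ _ (by omega), bit_eq]
  split <;> simp

-- one bitboard step decodes to one list step
lemma commute_step (N : Nat) (x : Nat) (hx : x < 2 ^ N) :
    decB (N : Int) (stepN (2 ^ N - 1) x) = stepB (N : Int) (decB (N : Int) x) := by
  apply List.ext_getElem
  · simp [length_decB, length_stepB]
  · intro k h1 h2
    have hkN : k < N := by simpa [length_decB] using h1
    rw [decB_getElem _ _ _ h1, bit_eq]
    have hR : (stepB (N : Int) (decB (N : Int) x))[k]
        = (if (if (k : Int) > 0 then PySem.List.pyGetD (decB (N : Int) x) ((k : Int) - 1) 0 else 0)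
              == (if (k : Int) < (N : Int) - 1 then PySem.List.pyGetD (decB (N : Int) x) ((k : Int) + 1) 0 else 0)
           then (0 : Int) else 1) := by
      simp [stepB, PySem.List.getElem_pyRange_one]
    rw [hR]
    have hcomm : 1 + k = k + 1 := by omega
    have htb : (stepN (2 ^ N - 1) x).testBit k
        = ((decide (1 ≤ k) && x.testBit (k - 1)) ^^ x.testBit (k + 1)) := by
      simp [stepN, Nat.testBit_xor, Nat.testBit_shiftLeft,
        Nat.testBit_shiftRight, hcomm, hkN]
    by_cases hk0 : k = 0
    · subst hk0
      simp only [Nat.cast_zero] at *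
      rw [htb, if_neg (show ¬((0 : Int) > 0) by norm_num)]
      by_cases hN2 : (0 : Int) < (N : Int) - 1
      · rw [if_pos hN2]
        have h1N : 1 < N := by omega
        have hc : ((0 : Int) + 1) = ((1 : Nat) : Int) := by norm_num
        rw [hc, decB_pyGetD N x 1 (by omega)]
        cases x.testBit 1 <;> simp
      · rw [if_neg hN2]
        have hN1 : N ≤ 1 := by omega
        have hb : x.testBit 1 = false :=
          Nat.testBit_lt_two_pow (lt_of_lt_of_le hx (Nat.pow_le_pow_right (by omega) (by omega)))
        simp [hb]
    · have hk1 : 1 ≤ k := by omega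
      rw [htb, if_pos (show (k : Int) > 0 by omega)]
      have hL : (k : Int) - 1 = ((k - 1 : Nat) : Int) := by omega
      rw [hL, decB_pyGetD N x (k - 1) (by omega)]
      by_cases hR2 : (k : Int) < (N : Int) - 1
      · rw [if_pos hR2]
        have hc : (k : Int) + 1 = ((k + 1 : Nat) : Int) := by omega
        rw [hc, decB_pyGetD N x (k + 1) (by omega)]
        cases x.testBit (k - 1) <;> cases x.testBit (k + 1) <;> simp [hk1]
      · rw [if_neg hR2]
        have hb : x.testBit (k + 1) = false :=
          Nat.testBit_lt_two_pow (lt_of_lt_of_le hx (Nat.pow_le_pow_right (by omega) (by omega)))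
        cases x.testBit (k - 1) <;> simp [hb, hk1]

-- k bitboard steps after encoding day 1 = k + 1 list steps
lemma iterate_correspond (s : List Int) (N : Nat) (hN : N = s.length) (k : Nat) :
    decB (N : Int) ((stepN (2 ^ N - 1))^[k] (encB (stepB (N : Int) s)))
      = (stepB (N : Int))^[k + 1] s := by
  induction k with
  | zero =>
    have hlen : (stepB (N : Int) s).length = N := by
      rw [length_stepB]; omega
    have h := dec_enc (stepB (N : Int) s) (binary_stepB _ s)
    rw [hlen] at h
    simpa using h
  | succ m ih =>
    have hlt : (stepN (2 ^ N - 1))^[m] (encB (stepB (N : Int) s)) < 2 ^ N := by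
      cases m with
      | zero =>
        have hlen : (stepB (N : Int) s).length = N := by rw [length_stepB]; omega
        have h := encB_lt (stepB (N : Int) s) (binary_stepB _ s)
        rw [hlen] at h
        simpa using h
      | succ m' =>
        rw [Function.iterate_succ_apply']
        exact stepN_lt N _
    rw [Function.iterate_succ_apply', commute_step N _ hlt, ih,
        ← Function.iterate_succ_apply' (stepB (N : Int))]

lemma loopB_spec (mask : Nat) (days : Int) (x1 : Nat) :
    ∀ (fuel : Nat) (seen : PySem.Dict Nat Int) (x : Nat) (d : Int),
      1 ≤ d → d.toNat ≤ days.toNat → days.toNat - d.toNat ≤ fuel →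
      x = (stepN mask)^[d.toNat - 1] x1 →
      (∀ k v, seen.get? k = some v → 1 ≤ v ∧ v < d ∧ (stepN mask)^[v.toNat - 1] x1 = k) →
      loopB days mask fuel seen x d = (stepN mask)^[days.toNat - 1] x1 := by
  intro fuel
  induction fuel with
  | zero =>
    intro seen x d hd0 hdle hfuel hx _
    have : d.toNat = days.toNat := by omega
    rw [loopB, hx, this]
  | succ f ih =>
    intro seen x d hd0 hdle hfuel hx hseen
    rw [loopB]
    by_cases hlt : d < days
    · simp only [if_pos hlt]
      cases hget : seen.get? x with
      | none =>
        exact ih (seen.insert x d) (stepN mask x) (d + 1) (by omega) (by omega) (by omega)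
          (by rw [hx]
              have h1 : (d + 1).toNat - 1 = (d.toNat - 1) + 1 := by omega
              rw [h1, Function.iterate_succ_apply'])
          (by intro k v h
              rw [PySem.Dict.get?_insert] at h
              by_cases hk : k = x
              · rw [if_pos hk] at h
                obtain rfl : v = d := by injection h; omega
                exact ⟨hd0, by omega, by rw [← hx, hk]⟩
              · rw [if_neg hk] at h
                obtain ⟨h1, h2, h3⟩ := hseen k v h
                exact ⟨h1, by omega, h3⟩)
      | some e =>
        simp only []
        obtain ⟨he0, hed, hiter⟩ := hseen x e hget
        rw [foldl_range_iterate, hx, ← Function.iterate_add_apply]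
        have hpos : (0 : Int) < d - e := by omega
        have hmod : PySem.Int.mod (days - d) (d - e) = (days - d) % (d - e) :=
          PySem.Int.mod_eq_emod_of_pos hpos
        have hq : 0 ≤ (days - d) / (d - e) := Int.ediv_nonneg (by omega) (by omega)
        have hr0 : 0 ≤ (days - d) % (d - e) := Int.emod_nonneg _ (by omega)
        have hrlt : (days - d) % (d - e) < d - e := Int.emod_lt_of_pos _ hpos
        have heq : (d - e) * ((days - d) / (d - e)) + (days - d) % (d - e) = days - d := by
          have := Int.emod_add_mul_ediv (days - d) (d - e); omega
        have hcast : ((((days - d) / (d - e)).toNat * (d - e).toNat : Nat) : Int)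
            = (d - e) * ((days - d) / (d - e)) := by
          push_cast [Int.toNat_of_nonneg hq, Int.toNat_of_nonneg (le_of_lt hpos)]
          ring
        have hper : (stepN mask)^[(e.toNat - 1) + (d - e).toNat] x1
            = (stepN mask)^[e.toNat - 1] x1 := by
          have h1 : (e.toNat - 1) + (d - e).toNat = d.toNat - 1 := by omega
          rw [h1, hiter, hx]
        have key : days.toNat - 1
            = ((d.toNat - 1) + (PySem.Int.mod (days - d) (d - e)).toNat)
              + ((days - d) / (d - e)).toNat * (d - e).toNat := by
          rw [hmod]; omega
        rw [key, Nat.add_comm (PySem.Int.mod (days - d) (d - e)).toNat (d.toNat - 1)]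
        exact (periodic_iterate (stepN mask) x1 (e.toNat - 1) ((d - e).toNat) hper
          (((days - d) / (d - e)).toNat)
          ((d.toNat - 1) + (PySem.Int.mod (days - d) (d - e)).toNat) (by omega)).symm
    · simp only [if_neg hlt]
      have : d.toNat = days.toNat := by omega
      rw [hx, this]

lemma alt_eq_iterate (states : List Int) (days : Int) :
    cellCompetition_alt states days
      = (stepB (states.length : Int))^[days.toNat] states := by
  unfold cellCompetition_alt
  simp only [PySem.List.len_eq]
  by_cases hdn : days ≤ 0 ∨ (states.length : Int) = 0
  · rw [if_pos hdn]
    rcases hdn with h | h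
    · have : days.toNat = 0 := by omega
      rw [this]; rfl
    · have hnil : states = [] := by
        have : states.length = 0 := by omega
        exact List.eq_nil_of_length_eq_zero this
      subst hnil
      have hfix : stepB ((([] : List Int).length : Int)) [] = [] := rfl
      rw [Function.iterate_fixed hfix]
  · rw [if_neg hdn]
    rw [not_or] at hdn
    obtain ⟨hd', hn'⟩ := hdn
    have hd : 0 < days := by omega
    have hn : states.length ≠ 0 := by
      intro h; exact hn' (by rw [h]; rfl)
    have hmask : (1 <<< (states.length : Int).toNat) - 1 = 2 ^ states.length - 1 := by
      simp [Nat.shiftLeft_eq]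
    have hloop := loopB_spec ((1 <<< (states.length : Int).toNat) - 1) days
        (encB (stepB (states.length : Int) states)) days.toNat PySem.Dict.empty
        (encB (stepB (states.length : Int) states)) 1 le_rfl (by omega) (by omega)
        (by norm_num)
        (by intro k v h; simp [PySem.Dict.get?_empty] at h)
    rw [hloop, hmask]
    have hcorr := iterate_correspond states states.length rfl (days.toNat - 1)
    have h1 : days.toNat - 1 + 1 = days.toNat := by omega
    rw [h1] at hcorr
    exact hcorr


lemma foldl_innerA (n0 : Nat) :
    ∀ (l : List Int) (s : List Int), s.length = n0 →
    l.foldl (fun s _ => (innerA (n0 : Int) s).1) s = (stepB (n0 : Int))^[l.length] s := by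
  intro l
  induction l with
  | nil => intro s _; rfl
  | cons a t ih =>
    intro s hs
    have h1 : (innerA (n0 : Int) s).1 = stepB (n0 : Int) s :=
      innerA_eq_stepB _ s (by rw [hs])
    simp only [List.foldl_cons, List.length_cons]
    rw [h1, ih _ (by rw [length_stepB]; omega), Function.iterate_succ_apply]

lemma a_eq_iterate (states : List Int) (days : Int) :
    cellCompetition states days
      = (stepB (states.length : Int))^[days.toNat] states := by
  unfold cellCompetition
  have := foldl_innerA states.length (PySem.List.pyRange 0 days 1) states rfl
  simp only [PySem.List.len_eq]
  rw [this, PySem.List.length_pyRange_one]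
  norm_num

-- ===== VERDICT (by name: the statement is the Claim_ definition above) =====
theorem cellCompetition_spec : Claim_equal_cellCompetition := by
  intro states days _
  unfold Spec_cellCompetition
  rw [a_eq_iterate, alt_eq_iterate]
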